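-- pv_equiv track=rewrite | github.com/erick2j/sketch-vec-medial-axis | junction_procedure.py | _leaf_neighbour_map
-- ===== SOURCE A (Python) =====
-- from typing import Dict, Iterable, List, Optional, Tuple
--
-- NodeId = int
--
-- Edge = Tuple[NodeId, NodeId]
--
-- def _leaf_neighbour_map(edges: Iterable[Edge]) -> dict[NodeId, NodeId]:
--     adj: dict[NodeId, set[NodeId]] = {}
--     for u, v in edges:
--         adj.setdefault(u, set()).add(v)
--         adj.setdefault(v, set()).add(u)
--     return {
--         node: next(iter(neighbours))
--         for node, neighbours in adj.items()
--         if len(neighbours) == 1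
--     }
-- ===== SOURCE B (Python) =====
-- from typing import Dict, Iterable, List, Optional, Tuple
--
-- NodeId = int
--
-- Edge = Tuple[NodeId, NodeId]
--
-- def _leaf_neighbour_map(edges: Iterable[Edge]) -> dict[NodeId, NodeId]:
--     # One pass: remember each node's single candidate neighbour; a node that is
--     # ever seen with a second, different neighbour is disqualified for good.
--     cand: dict[NodeId, NodeId] = {}
--     disq: set[NodeId] = set()
--     for u, v in edges:
--         for n, nb in ((u, v), (v, u)):
--             if n in disq:
--                 continue
--             if n in cand:
--                 if cand[n] != nb:
--                     disq.add(n)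
--             else:
--                 cand[n] = nb
--     return {n: nb for n, nb in cand.items() if n not in disq}
-- ===== Notes on version B (the rewrite author's own statement) =====
-- stated objective: simpler
-- what changed: Instead of building a full adjacency dict of neighbour sets and then filtering for singleton sets, B keeps only one candidate neighbour per node plus a disqualified set in a single pass, never materialising neighbour sets.
import Mathlib
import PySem

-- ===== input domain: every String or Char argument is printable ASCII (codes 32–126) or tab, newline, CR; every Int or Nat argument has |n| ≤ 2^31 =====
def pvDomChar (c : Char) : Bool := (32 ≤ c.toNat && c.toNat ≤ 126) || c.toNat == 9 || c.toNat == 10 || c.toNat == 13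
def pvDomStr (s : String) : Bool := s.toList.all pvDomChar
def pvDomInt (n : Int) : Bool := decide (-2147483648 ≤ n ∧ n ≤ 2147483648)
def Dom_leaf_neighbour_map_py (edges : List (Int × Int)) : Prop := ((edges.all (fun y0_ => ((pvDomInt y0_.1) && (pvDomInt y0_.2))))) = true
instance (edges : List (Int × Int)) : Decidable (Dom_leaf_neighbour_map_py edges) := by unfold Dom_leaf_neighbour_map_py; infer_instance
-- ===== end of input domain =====

-- B replaces A's adjacency dict of neighbour sets by a single pass keeping one
-- candidate neighbour per node plus a disqualified set (objective: simpler).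

-- ===== PORT A =====
-- adj.setdefault(u, set()).add(v) is d[u] = d.get(u, set()) ∪ {v}, i.e. Dict.modify.
-- next(iter(s)) is taken only when len(s) == 1, where it is the single element (headD 0 is exact there).
def leaf_neighbour_map_py (edges : List (Int × Int)) : List (Int × Int) :=
  let adj : PySem.Dict Int (PySem.Set Int) :=
    edges.foldl (fun d e =>
      (d.modify e.1 PySem.Set.empty (fun s => PySem.Set.add s e.2)).modify e.2
        PySem.Set.empty (fun s => PySem.Set.add s e.1))
      PySem.Dict.empty
  (adj.items.filter (fun p => p.2.length == 1)).map (fun p => (p.1, p.2.headD 0))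

-- ===== PORT B =====
def pvStepB (st : PySem.Dict Int Int × PySem.Set Int) (n nb : Int) :
    PySem.Dict Int Int × PySem.Set Int :=
  if PySem.Set.contains st.2 n then st
  else
    match st.1.get? n with
    | some c => if c ≠ nb then (st.1, PySem.Set.add st.2 n) else st
    | none => (st.1.insert n nb, st.2)

def leaf_neighbour_map_py_alt (edges : List (Int × Int)) : List (Int × Int) :=
  let st := edges.foldl (fun st e => pvStepB (pvStepB st e.1 e.2) e.2 e.1)
    (PySem.Dict.empty, PySem.Set.empty)
  st.1.items.filter (fun p => !(PySem.Set.contains st.2 p.1))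

-- ===== PRECONDITION & SPEC =====
def Spec_leaf_neighbour_map_py (edges : List (Int × Int)) (out : List (Int × Int)) : Prop := out = leaf_neighbour_map_py_alt edges
instance (edges : List (Int × Int)) (out : List (Int × Int)) : Decidable (Spec_leaf_neighbour_map_py edges out) := by unfold Spec_leaf_neighbour_map_py; infer_instance

-- ===== CLAIM (what is proved, stated in full; the proofs are below) =====
def Claim_equal_leaf_neighbour_map_py : Prop := ∀ (edges : List (Int × Int)), Dom_leaf_neighbour_map_py edges → Spec_leaf_neighbour_map_py edges (leaf_neighbour_map_py edges)

-- ===== LEMMAS AND PROOFS =====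

-- The coupling invariant between A's adjacency state and B's (candidate, disqualified) state.
def pvInv (adj : PySem.Dict Int (PySem.Set Int)) (cand : PySem.Dict Int Int)
    (disq : PySem.Set Int) : Prop :=
  adj.keys.Nodup ∧
  cand.items = adj.items.map (fun p => (p.1, p.2.headD 0)) ∧
  (∀ p ∈ adj.items, p.2 ≠ [] ∧ PySem.Set.contains disq p.1 = decide (2 ≤ p.2.length)) ∧
  (∀ n : Int, adj.contains n = false → PySem.Set.contains disq n = false)


-- get? through a value-map that keeps keys (used to read B's candidate off A's adjacency items)
lemma pvGet?_map (l : List (Int × PySem.Set Int)) (n : Int) :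
    (PySem.Dict.mk (l.map (fun p => (p.1, p.2.headD (0:Int))))).get? n
      = ((PySem.Dict.mk l).get? n).map (fun s => s.headD (0:Int)) := by
  induction l with
  | nil => rfl
  | cons p l ih =>
      obtain ⟨k, v⟩ := p
      by_cases hpn : (k == n) = true
      · simp [PySem.Dict.get?_mk_cons, hpn]
      · simp only [List.map_cons, PySem.Dict.get?_mk_cons, hpn, if_false, Bool.false_eq_true]
        exact ih

lemma pvHeadD_append (s : List Int) (x d : Int) (h : s ≠ []) :
    (s ++ [x]).headD d = s.headD d := by
  cases s <;> simp_all

lemma pvInv_empty : pvInv PySem.Dict.empty PySem.Dict.empty PySem.Set.empty := by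
  refine ⟨by simp [PySem.Dict.empty], rfl, ?_, fun n _ => rfl⟩
  intro p hp
  simp [PySem.Dict.empty] at hp

lemma pvInv_step (adj : PySem.Dict Int (PySem.Set Int)) (cand : PySem.Dict Int Int)
    (disq : PySem.Set Int) (n nb : Int) (h : pvInv adj cand disq) :
    pvInv (adj.modify n PySem.Set.empty (fun s => PySem.Set.add s nb))
      (pvStepB (cand, disq) n nb).1 (pvStepB (cand, disq) n nb).2 := by
  obtain ⟨hnd, hcand, hmem, hout⟩ := h
  have hget : ∀ m : Int, cand.get? m = (adj.get? m).map (fun s => s.headD (0:Int)) := by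
    intro m
    have hc' : cand = PySem.Dict.mk (adj.items.map (fun p => (p.1, p.2.headD (0:Int)))) :=
      PySem.Dict.ext hcand
    rw [hc']; exact pvGet?_map adj.items m
  by_cases hc : adj.contains n = true
  · -- n already a key of adj
    obtain ⟨s, hs⟩ : ∃ s, adj.get? n = some s := by
      rcases ho : adj.get? n with _ | s
      · rw [PySem.Dict.contains_eq_isSome_get?, ho] at hc; simp at hc
      · exact ⟨s, rfl⟩
    have hsmem : (n, s) ∈ adj.items := PySem.Dict.mem_items_of_get?_eq_some adj hs
    obtain ⟨hsne, hsdisq⟩ := hmem _ hsmem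
    have hadj' : adj.modify n PySem.Set.empty (fun t => PySem.Set.add t nb)
        = adj.insert n (PySem.Set.add s nb) := by
      show adj.insert n (PySem.Set.add (adj.getD n PySem.Set.empty) nb) = _
      rw [PySem.Dict.getD_of_get?_eq_some adj _ hs]
    rw [hadj']
    have hcn : cand.get? n = some (s.headD 0) := by rw [hget, hs]; rfl
    have hval : ∀ p ∈ adj.items, (p.1 == n) = true → p.2 = s := by
      intro p hp hpn
      have := PySem.Dict.get?_of_mem_items adj (k := p.1) (v := p.2)
        (by exact hp) hnd
      rw [(by simpa using hpn : p.1 = n), hs] at this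
      exact (Option.some.inj this).symm
    by_cases hnb : nb ∈ s
    · -- repeated neighbour: the set add is a no-op, adj unchanged
      have hadd : PySem.Set.add s nb = s := by simp [PySem.Set.add, PySem.Set.contains, hnb]
      have hid : adj.insert n s = adj := by
        apply PySem.Dict.ext
        rw [PySem.Dict.items_insert_of_contains adj s hc]
        conv_rhs => rw [← List.map_id adj.items]
        apply List.map_congr_left
        intro p hp
        by_cases hpn : (p.1 == n) = true
        · have h1 : p.1 = n := by simpa using hpn
          have h2 : p.2 = s := hval p hp hpn
          rw [if_pos hpn, id]
          rw [Prod.ext_iff]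
          exact ⟨h1.symm, h2.symm⟩
        · rw [if_neg hpn, id]
      rw [hadd, hid]
      by_cases hd : PySem.Set.contains disq n = true
      · have hdm : n ∈ disq := by simpa [PySem.Set.contains] using hd
        have hstep : pvStepB (cand, disq) n nb = (cand, disq) := by simp [pvStepB, hdm]
        rw [hstep]
        exact ⟨hnd, hcand, hmem, hout⟩
      · have hd' : PySem.Set.contains disq n = false := by simpa using hd
        have hdm : n ∉ disq := by simpa [PySem.Set.contains] using hd
        have hlen1 : s.length = 1 := by
          have h0 : s.length ≠ 0 := by simpa using hsne
          have h2 : ¬ (2 ≤ s.length) := by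
            rw [hd'] at hsdisq; simpa using hsdisq.symm
          omega
        obtain ⟨a, ha⟩ := List.length_eq_one_iff.mp hlen1
        have hnba : nb = a := by rw [ha] at hnb; simpa using hnb
        have hstep : pvStepB (cand, disq) n nb = (cand, disq) := by
          simp [pvStepB, hdm, hcn, ha, hnba]
        rw [hstep]
        exact ⟨hnd, hcand, hmem, hout⟩
    · -- genuinely new neighbour: the set grows by one
      have hadd : PySem.Set.add s nb = s ++ [nb] := by
        simp [PySem.Set.add, PySem.Set.contains, hnb]
      rw [hadd]
      have hitems' : (adj.insert n (s ++ [nb])).items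
          = adj.items.map (fun p => if (p.1 == n) = true then (n, s ++ [nb]) else p) :=
        PySem.Dict.items_insert_of_contains adj _ hc
      have hkeys' : (adj.insert n (s ++ [nb])).keys = adj.keys :=
        PySem.Dict.keys_insert_of_contains adj _ hc
      have hmapf : (adj.insert n (s ++ [nb])).items.map (fun p => (p.1, p.2.headD (0:Int)))
          = adj.items.map (fun p => (p.1, p.2.headD (0:Int))) := by
        rw [hitems', List.map_map]
        apply List.map_congr_left
        intro p hp
        simp only [Function.comp]
        by_cases hpn : (p.1 == n) = true
        · rw [if_pos hpn, (show p.1 = n by simpa using hpn), hval p hp hpn,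
            pvHeadD_append s nb 0 hsne]
        · rw [if_neg hpn]
      have hcontains' : ∀ m : Int, (adj.insert n (s ++ [nb])).contains m = false →
          adj.contains m = false ∧ m ≠ n := by
        intro m hm
        rw [PySem.Dict.contains_insert] at hm
        rcases Bool.or_eq_false_iff.mp hm with ⟨h1, h2⟩
        exact ⟨h2, by simpa using h1⟩
      by_cases hd : PySem.Set.contains disq n = true
      · -- already disqualified: B skips, flag stays correct as the set only grows
        have hdm : n ∈ disq := by simpa [PySem.Set.contains] using hd
        have h2 : 2 ≤ s.length := by rw [hd] at hsdisq; simpa using hsdisq.symm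
        have hstep : pvStepB (cand, disq) n nb = (cand, disq) := by simp [pvStepB, hdm]
        rw [hstep]
        refine ⟨by rw [hkeys']; exact hnd, by rw [hmapf]; exact hcand, ?_, ?_⟩
        · intro p hp
          rw [hitems'] at hp
          obtain ⟨q, hq, hpq⟩ := List.mem_map.mp hp
          by_cases hqn : (q.1 == n) = true
          · rw [if_pos hqn] at hpq
            subst hpq
            refine ⟨by simp, ?_⟩
            show PySem.Set.contains disq n = decide (2 ≤ (s ++ [nb]).length)
            rw [hd]
            symm
            rw [decide_eq_true_iff]
            simp only [List.length_append, List.length_cons, List.length_nil]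
            omega
          · rw [if_neg hqn] at hpq; subst hpq; exact hmem q hq
        · intro m hm
          exact hout m (hcontains' m hm).1
      · -- first conflict: B disqualifies n
        have hd' : PySem.Set.contains disq n = false := by simpa using hd
        have hdm : n ∉ disq := by simpa [PySem.Set.contains] using hd
        have hlen1 : s.length = 1 := by
          have h0 : s.length ≠ 0 := by simpa using hsne
          have h2 : ¬ (2 ≤ s.length) := by rw [hd'] at hsdisq; simpa using hsdisq.symm
          omega
        obtain ⟨a, ha⟩ := List.length_eq_one_iff.mp hlen1
        have hnb2 : nb ≠ a := by rw [ha] at hnb; simpa using hnb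
        have hnba : a ≠ nb := hnb2.symm
        have hstep : pvStepB (cand, disq) n nb = (cand, PySem.Set.add disq n) := by
          simp [pvStepB, hdm, hcn, ha, hnba]
        rw [hstep]
        refine ⟨by rw [hkeys']; exact hnd, by rw [hmapf]; exact hcand, ?_, ?_⟩
        · intro p hp
          rw [hitems'] at hp
          obtain ⟨q, hq, hpq⟩ := List.mem_map.mp hp
          by_cases hqn : (q.1 == n) = true
          · rw [if_pos hqn] at hpq
            subst hpq
            refine ⟨by simp, ?_⟩
            show PySem.Set.contains (PySem.Set.add disq n) n = decide (2 ≤ (s ++ [nb]).length)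
            have hcad : PySem.Set.contains (PySem.Set.add disq n) n = true := by
              simp [PySem.Set.contains, PySem.Set.mem_add]
            rw [hcad, ha]
            simp
          · rw [if_neg hqn] at hpq
            subst hpq
            obtain ⟨hne1, hflag⟩ := hmem q hq
            refine ⟨hne1, ?_⟩
            have : PySem.Set.contains (PySem.Set.add disq n) q.1 = PySem.Set.contains disq q.1 := by
              have hq1 : q.1 ≠ n := by simpa using hqn
              simp [PySem.Set.contains, PySem.Set.mem_add, hq1]
            rw [this]; exact hflag
        · intro m hm
          obtain ⟨hm1, hm2⟩ := hcontains' m hm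
          have := hout m hm1
          simp only [PySem.Set.contains] at this ⊢
          simp_all
  · -- n is a fresh key of adj
    have hc' : adj.contains n = false := by simpa using hc
    have hadjget : adj.get? n = none := by
      rcases ho : adj.get? n with _ | s
      · rfl
      · rw [PySem.Dict.contains_eq_isSome_get?, ho] at hc'; simp at hc'
    have hadj' : adj.modify n PySem.Set.empty (fun t => PySem.Set.add t nb)
        = adj.insert n [nb] := by
      show adj.insert n (PySem.Set.add (adj.getD n PySem.Set.empty) nb) = _
      rw [PySem.Dict.getD_of_not_contains adj _ hc']
      rfl
    rw [hadj']
    have hd : PySem.Set.contains disq n = false := hout n hc'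
    have hdm : n ∉ disq := by simpa [PySem.Set.contains] using hd
    have hcn : cand.get? n = none := by rw [hget, hadjget]; rfl
    have hcandc : cand.contains n = false := by
      rw [PySem.Dict.contains_eq_isSome_get?, hcn]; rfl
    have hitems' : (adj.insert n [nb]).items = adj.items ++ [(n, [nb])] :=
      PySem.Dict.items_insert_of_not_contains adj _ hc'
    have hstep : pvStepB (cand, disq) n nb = (cand.insert n nb, disq) := by
      simp [pvStepB, hdm, hcn]
    rw [hstep]
    refine ⟨?_, ?_, ?_, ?_⟩
    · rw [PySem.Dict.keys_insert_of_not_contains adj _ hc']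
      have hn : n ∉ adj.keys := fun hmem' =>
        by rw [(PySem.Dict.contains_iff_mem_keys adj n).mpr hmem'] at hc'; simp at hc'
      refine List.Nodup.append hnd (List.nodup_singleton n) ?_
      intro a ha hb
      simp only [List.mem_singleton] at hb
      exact hn (hb ▸ ha)
    · rw [PySem.Dict.items_insert_of_not_contains cand _ hcandc, hitems', List.map_append,
        hcand]
      rfl
    · intro p hp
      rw [hitems'] at hp
      rcases List.mem_append.mp hp with hp | hp
      · exact hmem p hp
      · have : p = (n, [nb]) := by simpa using hp
        subst this
        refine ⟨by simp, ?_⟩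
        rw [hd]; simp
    · intro m hm
      rw [PySem.Dict.contains_insert] at hm
      exact hout m (Bool.or_eq_false_iff.mp hm).2

lemma pvInv_fold (edges : List (Int × Int)) (adj : PySem.Dict Int (PySem.Set Int))
    (cand : PySem.Dict Int Int) (disq : PySem.Set Int) (h : pvInv adj cand disq) :
    pvInv
      (edges.foldl (fun d e =>
        (d.modify e.1 PySem.Set.empty (fun s => PySem.Set.add s e.2)).modify e.2
          PySem.Set.empty (fun s => PySem.Set.add s e.1)) adj)
      (edges.foldl (fun st e => pvStepB (pvStepB st e.1 e.2) e.2 e.1) (cand, disq)).1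
      (edges.foldl (fun st e => pvStepB (pvStepB st e.1 e.2) e.2 e.1) (cand, disq)).2 := by
  induction edges generalizing adj cand disq with
  | nil => exact h
  | cons e es ih =>
      have h1 := pvInv_step adj cand disq e.1 e.2 h
      have h2 := pvInv_step _ _ _ e.2 e.1 h1
      simpa using ih _ _ _ h2

lemma pvInv_out (adj : PySem.Dict Int (PySem.Set Int)) (cand : PySem.Dict Int Int)
    (disq : PySem.Set Int) (h : pvInv adj cand disq) :
    (adj.items.filter (fun p => p.2.length == 1)).map (fun p => (p.1, p.2.headD 0)) =
      cand.items.filter (fun p => !(PySem.Set.contains disq p.1)) := by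
  obtain ⟨hnd, hcand, hmem, hout⟩ := h
  rw [hcand, List.filter_map]
  apply congrArg (List.map _)
  apply List.filter_congr
  intro p hp
  obtain ⟨hne, hdq⟩ := hmem p hp
  simp only [Function.comp]
  rw [hdq]
  have h1 : 1 ≤ p.2.length := List.length_pos_iff.mpr hne
  by_cases h2 : p.2.length = 1
  · simp [h2]
  · have : 2 ≤ p.2.length := by omega
    simp [h2, this]

-- ===== VERDICT (by name: the statement is the Claim_ definition above) =====
theorem leaf_neighbour_map_py_spec : Claim_equal_leaf_neighbour_map_py := by
  intro edges _
  unfold Spec_leaf_neighbour_map_py leaf_neighbour_map_py leaf_neighbour_map_py_alt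
  have h := pvInv_fold edges _ _ _ pvInv_empty
  exact pvInv_out _ _ _ h
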